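-- pv_equiv track=rewrite | github.com/ndwmiller/TheBudgeteers-SpendSmart | screens/goals_screen.py | clean_amount_text
-- ===== SOURCE A (Python) =====
-- MAX_AMOUNT = 9_999_999.99
--
-- MAX_AMOUNT_TEXT_LENGTH = len(f'{int(MAX_AMOUNT)}.99')
--
-- def clean_amount_text(value):
--     raw = str(value)
--     cleaned = []
--     dot_seen = False
--     decimal_count = 0
--     integer_count = 0
--     max_integer_digits = len(str(int(MAX_AMOUNT)))
--
--     for char in raw:
--         if char.isdigit():
--             if dot_seen:
--                 if decimal_count >= 2:
--                     continue
--                 decimal_count += 1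
--             else:
--                 if integer_count >= max_integer_digits:
--                     continue
--                 integer_count += 1
--             cleaned.append(char)
--         elif char == '.' and not dot_seen:
--             dot_seen = True
--             cleaned.append(char)
--
--         if len(cleaned) >= MAX_AMOUNT_TEXT_LENGTH:
--             break
--
--     return ''.join(cleaned)
-- ===== SOURCE B (Python) =====
-- def clean_amount_text(value):
--     raw = str(value)
--     if '.' not in raw:
--         return ''.join(c for c in raw if c.isdigit())[:7]
--     head, _, tail = raw.partition('.')
--     integer_part = ''.join(c for c in head if c.isdigit())[:7]
--     decimal_part = ''.join(c for c in tail if c.isdigit())[:2]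
--     return integer_part + '.' + decimal_part
-- ===== Notes on version B (the rewrite author's own statement) =====
-- stated objective: simpler
-- what changed: Replaced the single stateful scan (dot flag, two digit counters, early break) by partitioning the string at its first dot and taking the first 7 digits of the head and the first 2 digits of the tail.
import Mathlib
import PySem

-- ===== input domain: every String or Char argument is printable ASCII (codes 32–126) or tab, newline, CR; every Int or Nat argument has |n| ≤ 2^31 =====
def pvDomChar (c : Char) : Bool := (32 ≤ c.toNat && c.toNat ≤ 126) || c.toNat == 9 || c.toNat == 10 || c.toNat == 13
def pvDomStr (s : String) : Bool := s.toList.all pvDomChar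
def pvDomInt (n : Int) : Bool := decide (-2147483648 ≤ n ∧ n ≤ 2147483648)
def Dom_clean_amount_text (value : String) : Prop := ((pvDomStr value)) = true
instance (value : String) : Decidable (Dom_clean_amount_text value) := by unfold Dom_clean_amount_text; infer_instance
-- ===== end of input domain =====

-- B replaces A's single stateful flag-driven scan by a partition-at-the-first-dot then
-- filter/truncate decomposition (simpler; same cost).


-- ===== PORT A =====
-- A's loop: state (cleaned, dot_seen, decimal_count, integer_count); 'continue' skips
-- the length check, 'break' returns.  max_integer_digits = 7, MAX_AMOUNT_TEXT_LENGTH = 10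
-- (constants computed once from MAX_AMOUNT in the Python module).
-- char.isdigit() is ported as Char.isDigit, exact on the ASCII domain.
def cleanAmountLoop : List Char → List Char → Bool → Int → Int → List Char
  | [], cleaned, _, _, _ => cleaned
  | c :: rest, cleaned, dot, dc, ic =>
    if c.isDigit then
      if dot then
        if dc ≥ 2 then
          cleanAmountLoop rest cleaned dot dc ic   -- continue
        else
          let cleaned' := cleaned ++ [c]
          if cleaned'.length ≥ 10 then cleaned'    -- break
          else cleanAmountLoop rest cleaned' dot (dc + 1) ic
      else
        if ic ≥ 7 then
          cleanAmountLoop rest cleaned dot dc ic   -- continue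
        else
          let cleaned' := cleaned ++ [c]
          if cleaned'.length ≥ 10 then cleaned'    -- break
          else cleanAmountLoop rest cleaned' dot dc (ic + 1)
    else if c = '.' ∧ dot = false then
      let cleaned' := cleaned ++ [c]
      if cleaned'.length ≥ 10 then cleaned'        -- break
      else cleanAmountLoop rest cleaned' true dc ic
    else
      if cleaned.length ≥ 10 then cleaned          -- break
      else cleanAmountLoop rest cleaned dot dc ic

def clean_amount_text (value : String) : String :=
  String.ofList (cleanAmountLoop value.toList [] false 0 0)

-- ===== PORT B =====
-- Source B: partition raw at the first dot; keep the first 7 digits of the head and,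
-- if a dot was present, a '.' plus the first 2 digits of the tail.
-- str.partition('.') is ported as takeWhile / dropWhile at the first '.'.
def clean_amount_text_alt (value : String) : String :=
  let cs := value.toList
  if '.' ∈ cs then
    let head := cs.takeWhile (· ≠ '.')
    let tail := (cs.dropWhile (· ≠ '.')).tail
    String.ofList (((head.filter Char.isDigit).take 7) ++ '.' :: ((tail.filter Char.isDigit).take 2))
  else
    String.ofList ((cs.filter Char.isDigit).take 7)

-- ===== PRECONDITION & SPEC =====
def Spec_clean_amount_text (value : String) (out : String) : Prop := out = clean_amount_text_alt value
instance (value : String) (out : String) : Decidable (Spec_clean_amount_text value out) := by unfold Spec_clean_amount_text; infer_instance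

-- ===== CLAIM (what is proved, stated in full; the proofs are below) =====
def Claim_equal_clean_amount_text : Prop := ∀ (value : String), Dom_clean_amount_text value → Spec_clean_amount_text value (clean_amount_text value)

-- ===== LEMMAS AND PROOFS =====

-- What the loop appends from the remaining characters, given the current state.
def restSpec (dot : Bool) (dc ic : Int) (cs : List Char) : List Char :=
  if dot then
    (cs.filter Char.isDigit).take (2 - dc).toNat
  else if '.' ∈ cs then
    ((cs.takeWhile (· ≠ '.')).filter Char.isDigit).take (7 - ic).toNat
      ++ '.' :: (((cs.dropWhile (· ≠ '.')).tail.filter Char.isDigit).take 2)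
  else
    (cs.filter Char.isDigit).take (7 - ic).toNat

theorem cleanAmountLoop_spec (cs : List Char) :
    ∀ (acc : List Char) (dot : Bool) (dc ic : Int),
    0 ≤ dc → dc ≤ 2 → 0 ≤ ic → ic ≤ 7 → (dot = false → dc = 0) →
    (acc.length : Int) = ic + (if dot then 1 + dc else 0) →
    cleanAmountLoop cs acc dot dc ic = acc ++ restSpec dot dc ic cs := by
  induction cs with
  | nil =>
    intro acc dot dc ic _ _ _ _ _ _
    simp only [cleanAmountLoop, restSpec]
    split <;> simp
  | cons c rest ih =>
    intro acc dot dc ic hdc0 hdc2 hic0 hic7 hdz hlen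
    simp only [cleanAmountLoop]
    by_cases hd : c.isDigit
    · rw [if_pos hd]
      by_cases hdot : dot = true
      · subst hdot
        have hL : (acc.length : Int) = ic + 1 + dc := by simp at hlen; omega
        rw [if_pos rfl]
        by_cases h2 : dc ≥ 2
        · -- continue: dc = 2, nothing more is ever appended after the dot
          have hdc : dc = 2 := le_antisymm hdc2 h2
          subst hdc
          rw [if_pos h2, ih acc true 2 ic hdc0 hdc2 hic0 hic7 (by simp) hlen]
          simp [restSpec, hd]
        · rw [if_neg h2]
          by_cases hb : (acc ++ [c]).length ≥ 10
          · -- break: the appended c is the last decimal digit the spec keeps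
            have hbl : (acc ++ [c]).length = acc.length + 1 := by simp
            have hdc : dc = 1 := by omega
            subst hdc
            rw [if_pos hb]
            simp [restSpec, hd]
          · rw [if_neg hb,
               ih (acc ++ [c]) true (dc + 1) ic (by omega) (by omega) hic0 hic7 (by simp)
                  (by simp; omega)]
            have htk : (2 - dc).toNat = (2 - (dc + 1)).toNat + 1 := by omega
            simp [restSpec, hd, htk]
      · have hdot' : dot = false := by simpa using hdot
        subst hdot'
        have hdc : dc = 0 := hdz rfl
        subst hdc
        have hL : (acc.length : Int) = ic := by simp at hlen; omega
        rw [if_neg (by simp)]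
        have hcdot : ¬ c = '.' := by rintro rfl; simp at hd
        have hcdot' : ¬ '.' = c := fun h => hcdot h.symm
        by_cases h7 : ic ≥ 7
        · -- continue: the integer part is full; the spec takes 0 further head digits
          have hic : ic = 7 := le_antisymm hic7 h7
          subst hic
          rw [if_pos h7, ih acc false 0 7 le_rfl (by omega) hic0 hic7 (fun _ => rfl) hlen]
          by_cases hm : '.' ∈ rest
          · simp [restSpec, hm, hcdot, hcdot', hd]
          · simp [restSpec, hm, hcdot', hd]
        · rw [if_neg h7]
          have hb : ¬ ((acc ++ [c]).length ≥ 10) := by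
            have : (acc ++ [c]).length = acc.length + 1 := by simp
            omega
          rw [if_neg hb,
             ih (acc ++ [c]) false 0 (ic + 1) le_rfl (by omega) (by omega) (by omega)
                (fun _ => rfl) (by simp; omega)]
          have htk : (7 - ic).toNat = (7 - (ic + 1)).toNat + 1 := by omega
          by_cases hm : '.' ∈ rest
          · simp [restSpec, hm, hcdot, hcdot', hd, htk]
          · simp [restSpec, hm, hcdot', hd, htk]
    · rw [if_neg hd]
      have hdig : Char.isDigit c = false := by simpa using hd
      by_cases hcdot : c = '.'
      · subst hcdot
        by_cases hdot : dot = true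
        · -- a second dot is ignored; the loop only checks the length here
          subst hdot
          have hL : (acc.length : Int) = ic + 1 + dc := by simp at hlen; omega
          rw [if_neg (by simp)]
          by_cases hb : acc.length ≥ 10
          · -- break with the full state: the spec appends nothing more
            have : dc = 2 := by omega
            subst this
            rw [if_pos hb]
            simp [restSpec, hdig]
          · rw [if_neg hb, ih acc true dc ic hdc0 hdc2 hic0 hic7 (by simp) hlen]
            simp [restSpec, hdig]
        · have hdot' : dot = false := by simpa using hdot
          subst hdot'
          have hdc : dc = 0 := hdz rfl
          subst hdc
          have hL : (acc.length : Int) = ic := by simp at hlen; omega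
          rw [if_pos (by simp)]
          have hb : ¬ ((acc ++ ['.']).length ≥ 10) := by
            have : (acc ++ ['.']).length = acc.length + 1 := by simp
            omega
          rw [if_neg hb,
             ih (acc ++ ['.']) true 0 ic le_rfl (by omega) hic0 hic7 (by simp)
                (by simp; omega)]
          simp [restSpec]
      · -- any other character is skipped; the loop only checks the length
        have hcdot' : ¬ '.' = c := fun h => hcdot h.symm
        rw [if_neg (by simp [hcdot])]
        by_cases hb : acc.length ≥ 10
        · have hdot : dot = true := by
            by_contra h
            have hz := hdz (by simpa using h)
            rw [if_neg (by simpa using h)] at hlen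
            omega
          subst hdot
          have : dc = 2 := by simp at hlen; omega
          subst this
          rw [if_pos hb]
          simp [restSpec, hdig]
        · rw [if_neg hb, ih acc dot dc ic hdc0 hdc2 hic0 hic7 hdz hlen]
          cases dot with
          | true => simp [restSpec, hdig]
          | false =>
            by_cases hm : '.' ∈ rest
            · simp [restSpec, hm, hcdot, hcdot', hdig]
            · simp [restSpec, hm, hcdot', hdig]

-- ===== VERDICT (by name: the statement is the Claim_ definition above) =====
theorem clean_amount_text_spec : Claim_equal_clean_amount_text := by
  intro value _
  unfold Spec_clean_amount_text clean_amount_text clean_amount_text_alt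
  rw [cleanAmountLoop_spec value.toList [] false 0 0 le_rfl (by omega) le_rfl (by omega)
        (fun _ => rfl) (by simp)]
  by_cases hm : '.' ∈ value.toList <;> simp [restSpec, hm]
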